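-- pv_equiv track=rewrite | github.com/AShiSH001000/FLA_CFG_TO_LMD | import tkinter as tk.py | convert_cfg_to_lmd_logic
-- ===== SOURCE A (Python) =====
-- def convert_cfg_to_lmd_logic(cfg, start_symbol):
--     def derive_lmd(cfg_dict, current_symbol):
--         if current_symbol in cfg_dict:
--             production = cfg_dict[current_symbol][0]
--             lmd_result = [current_symbol]
--             for symbol in production.split():
--                 lmd_result.append('=>')
--                 lmd_result.append(derive_lmd(cfg_dict, symbol))
--             return ' '.join(lmd_result)
--         else:
--             return current_symbol
--
--     # Split the CFG text into production rules
--     production_rules = [rule.strip() for rule in cfg.split('\n') if rule.strip()]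
--
--     # Create a dictionary to represent the production rules
--     cfg_dict = {}
--     for rule in production_rules:
--         left, right = rule.split('->')
--         cfg_dict[left.strip()] = [prod.strip() for prod in right.split('|')]
--
--     lmd_result = derive_lmd(cfg_dict, start_symbol)
--     return lmd_result
-- ===== SOURCE B (Python) =====
-- def convert_cfg_to_lmd_logic(cfg, start_symbol):
--     # identical parsing pass
--     production_rules = [rule.strip() for rule in cfg.split('\n') if rule.strip()]
--     cfg_dict = {}
--     for rule in production_rules:
--         left, right = rule.split('->')
--         cfg_dict[left.strip()] = [prod.strip() for prod in right.split('|')]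
--     # iterative leftmost pre-order traversal with an explicit stack (A recurses)
--     output = []
--     stack = [start_symbol]
--     while stack:
--         sym = stack.pop()
--         output.append(sym)
--         if sym in cfg_dict:
--             stack.extend(reversed(cfg_dict[sym][0].split()))
--     return ' => '.join(output)
-- ===== Notes on version B (the rewrite author's own statement) =====
-- stated objective: alternative
-- what changed: derive_lmd's recursive descent is replaced by an iterative explicit-stack pre-order traversal that emits symbols into a flat list and joins them with ' => ' once; the parsing pass is unchanged.
import Mathlib
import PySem

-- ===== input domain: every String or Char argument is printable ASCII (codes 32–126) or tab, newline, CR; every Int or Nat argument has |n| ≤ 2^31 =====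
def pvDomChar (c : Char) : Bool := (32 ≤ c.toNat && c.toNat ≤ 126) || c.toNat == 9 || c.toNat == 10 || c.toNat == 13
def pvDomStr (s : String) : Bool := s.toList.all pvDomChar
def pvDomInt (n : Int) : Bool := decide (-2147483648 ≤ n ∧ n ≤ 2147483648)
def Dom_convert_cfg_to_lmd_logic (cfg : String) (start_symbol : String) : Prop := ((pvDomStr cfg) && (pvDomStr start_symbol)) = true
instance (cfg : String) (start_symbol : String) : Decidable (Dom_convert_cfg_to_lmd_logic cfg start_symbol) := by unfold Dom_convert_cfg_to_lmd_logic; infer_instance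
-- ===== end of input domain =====

-- B replaces A's recursive derive_lmd with an iterative explicit-stack pre-order traversal (objective: alternative, same cost).
-- Both Pythons run the textually identical parsing pass, ported once as pvRules/pvBuildDict and shared by the two ports.

-- ===== PORT A =====
-- production_rules = [rule.strip() for rule in cfg.split('\n') if rule.strip()]
def pvRules (cfg : String) : List String :=
  (((PySem.Str.split? cfg "\n").getD []).map PySem.Str.strip).filter (fun r => r != "")

-- the parsing loop building cfg_dict; a line whose split('->') does not have exactly 2 parts
-- makes Python raise ValueError (excluded by Pre_): the '| _ => d' arm is a totality guard only
def pvBuildDict (cfg : String) : PySem.Dict String (List String) :=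
  (pvRules cfg).foldl (fun d rule =>
    match (PySem.Str.split? rule "->").getD [] with
    | [left, right] =>
        d.insert (PySem.Str.strip left) (((PySem.Str.split? right "|").getD []).map PySem.Str.strip)
    | _ => d) PySem.Dict.empty

-- cfg_dict[current_symbol][0].split(): index 0 of the (always nonempty) split('|') list
def pvWordsOf (prods : List String) : List String :=
  PySem.Str.split₀ (PySem.List.pyGetD prods 0 "")

-- derive_lmd, fuel-guarded: Python recurses without bound; on every input admitted by Pre_
-- (no cycle reachable from the start symbol) a fuel of d.size + 1 levels is more than the
-- recursion ever uses, so the fuel-0 arm is a totality guard only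
def pvDeriveA (d : PySem.Dict String (List String)) : Nat → String → String
  | 0, s => s
  | n+1, s =>
    match d.get? s with
    | some prods =>
        PySem.Str.join " "
          ((pvWordsOf prods).foldl (fun acc w => acc ++ ["=>", pvDeriveA d n w]) [s])
    | none => s

def convert_cfg_to_lmd_logic (cfg : String) (start_symbol : String) : String :=
  pvDeriveA (pvBuildDict cfg) ((pvBuildDict cfg).size + 1) start_symbol

-- ===== PORT B =====
-- per-node bound used only as the WF measure of the loop below
def pvBnd (W : Nat) : Nat → Nat
  | 0 => 1
  | n+1 => 1 + W * pvBnd W n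

def pvW (d : PySem.Dict String (List String)) : Nat :=
  d.values.foldl (fun acc p => max acc ((pvWordsOf p).length)) 0

lemma pvBnd_pos (W n : Nat) : 0 < pvBnd W n := by cases n <;> simp [pvBnd]

lemma pvLen_le_W (d : PySem.Dict String (List String)) (s : String) (prods : List String)
    (h : d.get? s = some prods) : (pvWordsOf prods).length ≤ pvW d := by
  have hm : prods ∈ d.values := by
    have hi := PySem.Dict.mem_items_of_get?_eq_some d h
    exact List.mem_map_of_mem hi
  exact (PySem.List.le_foldl_max_nat d.values (fun p => (pvWordsOf p).length) 0).2 _ hm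

-- the while loop of B: pop the head, emit it, and if it is a key push the words of its first
-- production back head-first (Python pushes them reversed onto the end of its list-stack, which
-- is the same LIFO order).  Each stack entry carries the same fuel counter as pvDeriveA's depth
-- (a totality guard only; never exhausted under Pre_).
def pvLoopB (d : PySem.Dict String (List String)) :
    List (String × Nat) → List String → List String
  | [], acc => acc.reverse
  | (s, n) :: rest, acc =>
    match h : d.get? s with
    | some prods =>
      match n with
      | 0 => pvLoopB d rest (s :: acc)
      | m+1 => pvLoopB d ((pvWordsOf prods).map (fun w => (w, m)) ++ rest) (s :: acc)
    | none => pvLoopB d rest (s :: acc)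
termination_by stack _ => (stack.map (fun p => pvBnd (pvW d) p.2)).sum
decreasing_by
  · have := pvBnd_pos (pvW d) 0; simp; omega
  · have hlen := pvLen_le_W d s prods h
    simp only [List.map_cons, List.map_append, List.map_map, List.sum_cons, List.sum_append, pvBnd]
    have h1 : (List.map ((fun p => pvBnd (pvW d) p.2) ∘ fun w => (w, m)) (pvWordsOf prods)).sum
        = (pvWordsOf prods).length * pvBnd (pvW d) m := by
      induction pvWordsOf prods with
      | nil => simp
      | cons x t ih => simp only [List.map_cons, List.sum_cons, List.length_cons, Function.comp, ih, Nat.succ_mul]; ring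
    have h2 : (pvWordsOf prods).length * pvBnd (pvW d) m ≤ pvW d * pvBnd (pvW d) m :=
      Nat.mul_le_mul_right _ hlen
    omega
  · have := pvBnd_pos (pvW d) n; simp; omega

def convert_cfg_to_lmd_logic_alt (cfg : String) (start_symbol : String) : String :=
  PySem.Str.join " => "
    (pvLoopB (pvBuildDict cfg) [(start_symbol, (pvBuildDict cfg).size + 1)] [])

-- ===== PRECONDITION & SPEC =====
-- helpers for Pre_: the first-production successor words of a symbol, and the set of symbols
-- reachable from a seed list (d.size + 1 expansion rounds reach the fixed point: any shortest
-- path repeats no key)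
def pvSucc (d : PySem.Dict String (List String)) (s : String) : List String :=
  match d.get? s with
  | some prods => pvWordsOf prods
  | none => []

def pvReach (d : PySem.Dict String (List String)) (seeds : List String) : List String :=
  (List.range (d.size + 1)).foldl
    (fun R _ => PySem.Set.update R (R.flatMap (pvSucc d))) (PySem.Set.ofList seeds)

-- Pre_ excludes exactly the inputs on which the Python A raises: a nonblank line without exactly
-- one '->' (ValueError in the tuple unpacking), and a grammar whose first-production graph has a
-- cycle reachable from start_symbol (unbounded recursion, RecursionError; B's loop would not
-- terminate there either).
def Pre_convert_cfg_to_lmd_logic (cfg : String) (start_symbol : String) : Prop :=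
  ((pvRules cfg).all (fun r => PySem.Str.count r "->" == 1)) = true ∧
  ((pvReach (pvBuildDict cfg) [start_symbol]).all
      (fun k => !(pvReach (pvBuildDict cfg) (pvSucc (pvBuildDict cfg) k)).contains k)) = true

instance (cfg : String) (start_symbol : String) : Decidable (Pre_convert_cfg_to_lmd_logic cfg start_symbol) := by
  unfold Pre_convert_cfg_to_lmd_logic; infer_instance

def pvWitness_convert_cfg_to_lmd_logic : String × String := ("S -> A b\nA -> a", "S")

def Spec_convert_cfg_to_lmd_logic (cfg : String) (start_symbol : String) (out : String) : Prop := out = convert_cfg_to_lmd_logic_alt cfg start_symbol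
instance (cfg : String) (start_symbol : String) (out : String) : Decidable (Spec_convert_cfg_to_lmd_logic cfg start_symbol out) := by unfold Spec_convert_cfg_to_lmd_logic; infer_instance

-- ===== CLAIM (what is proved, stated in full; the proofs are below) =====
def Claim_equal_convert_cfg_to_lmd_logic : Prop := ∀ (cfg : String) (start_symbol : String), Dom_convert_cfg_to_lmd_logic cfg start_symbol → Pre_convert_cfg_to_lmd_logic cfg start_symbol → Spec_convert_cfg_to_lmd_logic cfg start_symbol (convert_cfg_to_lmd_logic cfg start_symbol)

-- ===== LEMMAS AND PROOFS =====
-- The equality A = B is in fact unconditional on the ports (both are fuel-guarded with the same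
-- fuel); Pre_ is introduced and discharged without use.  Both sides are shown equal to
-- ' => '.join of the fuel-bounded pre-order trace pvTrace.

def pvTrace (d : PySem.Dict String (List String)) : Nat → String → List String
  | 0, s => [s]
  | n+1, s =>
    match d.get? s with
    | some prods => s :: (pvWordsOf prods).flatMap (pvTrace d n)
    | none => [s]

lemma pvTrace_ne_nil (d : PySem.Dict String (List String)) (n : Nat) (s : String) :
    pvTrace d n s ≠ [] := by
  cases n with
  | zero => simp [pvTrace]
  | succ m => cases h : d.get? s <;> simp [pvTrace, h]

lemma pv_join_cons_flat (sep s : List Char) (L : List (List Char)) :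
    PySem.Chars.join sep (s :: L) = s ++ L.flatMap (fun x => sep ++ x) := by
  induction L generalizing s with
  | nil => simp [PySem.Chars.join_singleton]
  | cons x t ih => rw [PySem.Chars.join_cons_cons, ih]; simp

lemma pv_chars_arrow (chunks : List (List (List Char))) (h : ∀ c ∈ chunks, c ≠ [])
    (s : List Char) :
    PySem.Chars.join " ".toList
        (s :: chunks.flatMap (fun c => ["=>".toList, PySem.Chars.join " => ".toList c]))
      = PySem.Chars.join " => ".toList (s :: chunks.flatten) := by
  rw [pv_join_cons_flat, pv_join_cons_flat]
  congr 1
  induction chunks with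
  | nil => simp
  | cons c t ih =>
    obtain ⟨y, ys, rfl⟩ := List.exists_cons_of_ne_nil (h c (List.mem_cons_self ..))
    have hsep : " => ".toList = " ".toList ++ "=>".toList ++ " ".toList := by decide
    simp only [List.flatMap_cons, List.flatten_cons, List.flatMap_append,
      List.cons_append, List.nil_append]
    rw [ih (fun c hc => h c (List.mem_cons_of_mem _ hc)), pv_join_cons_flat]
    simp [hsep]

lemma pv_Str_join_singleton (sep s : String) : PySem.Str.join sep [s] = s := by
  simp only [PySem.Str.join, List.map_cons, List.map_nil, PySem.Chars.join_singleton,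
    String.ofList_toList]

lemma pvDeriveA_eq_trace (d : PySem.Dict String (List String)) (n : Nat) (s : String) :
    pvDeriveA d n s = PySem.Str.join " => " (pvTrace d n s) := by
  induction n generalizing s with
  | zero => simp [pvDeriveA, pvTrace, pv_Str_join_singleton]
  | succ n ih =>
    cases h : d.get? s with
    | none => simp [pvDeriveA, pvTrace, h, pv_Str_join_singleton]
    | some prods =>
      simp only [pvDeriveA, pvTrace, h]
      rw [PySem.List.foldl_append_eq_flatMap]
      simp only [ih]
      show String.ofList _ = String.ofList _
      apply congrArg
      have := pv_chars_arrow ((pvWordsOf prods).map (fun w => (pvTrace d n w).map String.toList))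
        (by
          intro c hc
          obtain ⟨w, _, rfl⟩ := List.mem_map.mp hc
          simp [pvTrace_ne_nil])
        s.toList
      rw [List.flatMap_map, List.flatten_eq_flatMap, List.flatMap_map] at this
      simpa [List.map_flatMap, PySem.Str.toList_join] using this

lemma pvTrace_none (d : PySem.Dict String (List String)) (n : Nat) (s : String)
    (h : d.get? s = none) : pvTrace d n s = [s] := by
  cases n <;> simp [pvTrace, h]

lemma pvLoopB_eq_trace (d : PySem.Dict String (List String))
    (stack : List (String × Nat)) (acc : List String) :
    pvLoopB d stack acc = acc.reverse ++ stack.flatMap (fun p => pvTrace d p.2 p.1) := by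
  fun_induction pvLoopB d stack acc
  all_goals simp_all [pvTrace, pvTrace_none, List.flatMap_append, List.flatMap_map]

-- ===== VERDICT (by name: the statement is the Claim_ definition above) =====
theorem convert_cfg_to_lmd_logic_spec : Claim_equal_convert_cfg_to_lmd_logic := by
  intro cfg start _ _
  unfold Spec_convert_cfg_to_lmd_logic convert_cfg_to_lmd_logic convert_cfg_to_lmd_logic_alt
  rw [pvDeriveA_eq_trace, pvLoopB_eq_trace]
  simp
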